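-- pv_equiv track=rewrite | github.com/FStru/SocialItemRecommendation | code/dataprocess.py | degreestatistic
-- ===== SOURCE A (Python) =====
-- from collections import defaultdict
--
-- def degreestatistic(obj_inter_dic):
--     degree_to_obj_dic = defaultdict(int)
--     for key,value in obj_inter_dic.items():
--         degree_to_obj_dic[value] = degree_to_obj_dic[value]+1
--     degree_to_obj_definedic = defaultdict(int)
--     for key, value in degree_to_obj_dic.items():
--         if key<=5:
--             degree_to_obj_definedic[key] = value
--         elif key>=6 and key<=10:
--             degree_to_obj_definedic[6] = degree_to_obj_definedic[6]+value
--         elif key>=11 and key<=15: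
--             degree_to_obj_definedic[11] = degree_to_obj_definedic[11] + value
--         elif key>=16 and key<=20:
--             degree_to_obj_definedic[16] = degree_to_obj_definedic[16] + value
--         elif key>=21 and key<=50:
--             degree_to_obj_definedic[21] = degree_to_obj_definedic[21] + value
--         elif key>=51 and key<=100:
--             degree_to_obj_definedic[51] = degree_to_obj_definedic[51] + value
--         else:
--             degree_to_obj_definedic[101] = degree_to_obj_definedic[101] + value
--     degree_to_obj_define = sorted(degree_to_obj_definedic.items(), key=lambda item: item[0])
--     return degree_to_obj_define
-- ===== SOURCE B (Python) =====
-- def _bucket(v):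
--     if v <= 5:
--         return v
--     if v <= 10:
--         return 6
--     if v <= 15:
--         return 11
--     if v <= 20:
--         return 16
--     if v <= 50:
--         return 21
--     if v <= 100:
--         return 51
--     return 101
--
-- def degreestatistic(obj_inter_dic):
--     from collections import defaultdict
--     buckets = defaultdict(int)
--     for degree in obj_inter_dic.values():
--         buckets[_bucket(degree)] += 1
--     return sorted(buckets.items(), key=lambda item: item[0])
-- ===== Notes on version B (the rewrite author's own statement) =====
-- stated objective: simpler
-- what changed: B drops A's intermediate degree-to-count dictionary entirely: it makes a single pass over the degrees, bucketing each degree directly into one counter dict via a bucket-key helper, then sorts the items.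
import Mathlib
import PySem

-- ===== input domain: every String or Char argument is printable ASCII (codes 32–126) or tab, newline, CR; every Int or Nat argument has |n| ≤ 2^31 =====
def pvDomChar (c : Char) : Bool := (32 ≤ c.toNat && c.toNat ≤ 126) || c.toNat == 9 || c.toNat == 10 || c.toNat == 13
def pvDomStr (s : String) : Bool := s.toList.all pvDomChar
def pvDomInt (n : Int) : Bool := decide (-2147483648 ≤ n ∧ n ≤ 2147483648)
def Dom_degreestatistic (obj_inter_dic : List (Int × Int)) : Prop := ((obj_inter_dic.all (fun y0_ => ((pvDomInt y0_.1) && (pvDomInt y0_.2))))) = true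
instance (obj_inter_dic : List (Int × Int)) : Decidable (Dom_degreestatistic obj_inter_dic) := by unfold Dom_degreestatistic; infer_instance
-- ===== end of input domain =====

-- B fuses A's two passes into one: each degree is bucketed directly into a single counter dict (simpler, one pass, no intermediate degree→count dict); the return value is identical.

-- ===== PORT A =====
def degreestatistic (obj_inter_dic : List (Int × Int)) : List (Int × Int) :=
  let degree_to_obj_dic :=
    obj_inter_dic.foldl (fun d p => d.modify p.2 0 (· + 1)) PySem.Dict.empty
  let degree_to_obj_definedic :=
    degree_to_obj_dic.items.foldl (fun d p =>
      if p.1 ≤ 5 then d.insert p.1 p.2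
      else if 6 ≤ p.1 ∧ p.1 ≤ 10 then d.modify 6 0 (· + p.2)
      else if 11 ≤ p.1 ∧ p.1 ≤ 15 then d.modify 11 0 (· + p.2)
      else if 16 ≤ p.1 ∧ p.1 ≤ 20 then d.modify 16 0 (· + p.2)
      else if 21 ≤ p.1 ∧ p.1 ≤ 50 then d.modify 21 0 (· + p.2)
      else if 51 ≤ p.1 ∧ p.1 ≤ 100 then d.modify 51 0 (· + p.2)
      else d.modify 101 0 (· + p.2)) PySem.Dict.empty
  PySem.List.sorted degree_to_obj_definedic.items (fun item => item.1) false

-- ===== PORT B =====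
-- helper _bucket of Source B
def pvBucket (v : Int) : Int :=
  if v ≤ 5 then v
  else if v ≤ 10 then 6
  else if v ≤ 15 then 11
  else if v ≤ 20 then 16
  else if v ≤ 50 then 21
  else if v ≤ 100 then 51
  else 101

def degreestatistic_alt (obj_inter_dic : List (Int × Int)) : List (Int × Int) :=
  let buckets :=
    obj_inter_dic.foldl (fun d p => d.modify (pvBucket p.2) 0 (· + 1)) PySem.Dict.empty
  PySem.List.sorted buckets.items (fun item => item.1) false

-- ===== PRECONDITION & SPEC =====
def Spec_degreestatistic (obj_inter_dic : List (Int × Int)) (out : List (Int × Int)) : Prop := out = degreestatistic_alt obj_inter_dic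
instance (obj_inter_dic : List (Int × Int)) (out : List (Int × Int)) : Decidable (Spec_degreestatistic obj_inter_dic out) := by unfold Spec_degreestatistic; infer_instance

-- ===== CLAIM (what is proved, stated in full; the proofs are below) =====
def Claim_equal_degreestatistic : Prop := ∀ (obj_inter_dic : List (Int × Int)), Dom_degreestatistic obj_inter_dic → Spec_degreestatistic obj_inter_dic (degreestatistic obj_inter_dic)

-- ===== LEMMAS AND PROOFS =====

-- A's second loop body, named for the proofs (definitionally the lambda in the port of A)
def aStep (d : PySem.Dict Int Int) (p : Int × Int) : PySem.Dict Int Int :=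
  if p.1 ≤ 5 then d.insert p.1 p.2
  else if 6 ≤ p.1 ∧ p.1 ≤ 10 then d.modify 6 0 (· + p.2)
  else if 11 ≤ p.1 ∧ p.1 ≤ 15 then d.modify 11 0 (· + p.2)
  else if 16 ≤ p.1 ∧ p.1 ≤ 20 then d.modify 16 0 (· + p.2)
  else if 21 ≤ p.1 ∧ p.1 ≤ 50 then d.modify 21 0 (· + p.2)
  else if 51 ≤ p.1 ∧ p.1 ≤ 100 then d.modify 51 0 (· + p.2)
  else d.modify 101 0 (· + p.2)

theorem aStep_keyfact (p : Int × Int) (k : Int) (hk : k ≤ 5) (hne : p.1 ≠ k) : pvBucket p.1 ≠ k := by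
  unfold pvBucket; split_ifs <;> omega

theorem pvBucket_le5 {v : Int} (h : v ≤ 5) : pvBucket v = v := by
  unfold pvBucket
  split_ifs
  all_goals omega

-- contains after one aStep
theorem pvBucket_eq (p : Int × Int) :
    (¬ p.1 ≤ 5 → ¬ (6 ≤ p.1 ∧ p.1 ≤ 10) → ¬ (11 ≤ p.1 ∧ p.1 ≤ 15) → ¬ (16 ≤ p.1 ∧ p.1 ≤ 20) →
      ¬ (21 ≤ p.1 ∧ p.1 ≤ 50) → ¬ (51 ≤ p.1 ∧ p.1 ≤ 100) → pvBucket p.1 = 101) ∧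
    (¬ p.1 ≤ 5 → (6 ≤ p.1 ∧ p.1 ≤ 10) → pvBucket p.1 = 6) ∧
    (¬ p.1 ≤ 5 → (11 ≤ p.1 ∧ p.1 ≤ 15) → pvBucket p.1 = 11) ∧
    (¬ p.1 ≤ 5 → (16 ≤ p.1 ∧ p.1 ≤ 20) → pvBucket p.1 = 16) ∧
    (¬ p.1 ≤ 5 → (21 ≤ p.1 ∧ p.1 ≤ 50) → pvBucket p.1 = 21) ∧
    (¬ p.1 ≤ 5 → (51 ≤ p.1 ∧ p.1 ≤ 100) → pvBucket p.1 = 51) := by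
  unfold pvBucket
  refine ⟨?_, ?_, ?_, ?_, ?_, ?_⟩ <;> intros <;> (split_ifs <;> omega)

theorem contains_aStep (d : PySem.Dict Int Int) (p : Int × Int) (k : Int) :
    (aStep d p).contains k = ((k == pvBucket p.1) || d.contains k) := by
  obtain ⟨hb101, hb6, hb11, hb16, hb21, hb51⟩ := pvBucket_eq p
  unfold aStep
  split_ifs with h1 h2 h3 h4 h5 h6
  · rw [pvBucket_le5 h1, PySem.Dict.contains_insert]
  · rw [hb6 h1 h2, PySem.Dict.contains_modify]
  · rw [hb11 h1 h3, PySem.Dict.contains_modify]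
  · rw [hb16 h1 h4, PySem.Dict.contains_modify]
  · rw [hb21 h1 h5, PySem.Dict.contains_modify]
  · rw [hb51 h1 h6, PySem.Dict.contains_modify]
  · rw [hb101 h1 h2 h3 h4 h5 h6, PySem.Dict.contains_modify]

theorem getD_aStep (d : PySem.Dict Int Int) (p : Int × Int) (b : Int)
    (hfresh : p.1 ≤ 5 → d.contains p.1 = false) :
    (aStep d p).getD b 0 = d.getD b 0 + (if pvBucket p.1 == b then p.2 else 0) := by
  obtain ⟨hb101, hb6, hb11, hb16, hb21, hb51⟩ := pvBucket_eq p
  by_cases hpb : (pvBucket p.1 == b) = true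
  · rw [if_pos hpb]
    have hb : b = pvBucket p.1 := (beq_iff_eq.mp hpb).symm
    subst hb
    unfold aStep
    split_ifs with h1 h2 h3 h4 h5 h6
    · rw [pvBucket_le5 h1, PySem.Dict.getD_insert, if_pos rfl,
          PySem.Dict.getD_of_not_contains d 0 (hfresh h1)]
      omega
    · rw [hb6 h1 h2, PySem.Dict.getD_modify, if_pos rfl]
    · rw [hb11 h1 h3, PySem.Dict.getD_modify, if_pos rfl]
    · rw [hb16 h1 h4, PySem.Dict.getD_modify, if_pos rfl]
    · rw [hb21 h1 h5, PySem.Dict.getD_modify, if_pos rfl]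
    · rw [hb51 h1 h6, PySem.Dict.getD_modify, if_pos rfl]
    · rw [hb101 h1 h2 h3 h4 h5 h6, PySem.Dict.getD_modify, if_pos rfl]
  · rw [if_neg hpb, add_zero]
    have hne : pvBucket p.1 ≠ b := by
      intro h; exact hpb (beq_iff_eq.mpr h)
    unfold aStep
    split_ifs with h1 h2 h3 h4 h5 h6
    · rw [pvBucket_le5 h1] at hne
      rw [PySem.Dict.getD_insert, if_neg (Ne.symm hne)]
    · rw [hb6 h1 h2] at hne
      rw [PySem.Dict.getD_modify, if_neg (Ne.symm hne)]
    · rw [hb11 h1 h3] at hne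
      rw [PySem.Dict.getD_modify, if_neg (Ne.symm hne)]
    · rw [hb16 h1 h4] at hne
      rw [PySem.Dict.getD_modify, if_neg (Ne.symm hne)]
    · rw [hb21 h1 h5] at hne
      rw [PySem.Dict.getD_modify, if_neg (Ne.symm hne)]
    · rw [hb51 h1 h6] at hne
      rw [PySem.Dict.getD_modify, if_neg (Ne.symm hne)]
    · rw [hb101 h1 h2 h3 h4 h5 h6] at hne
      rw [PySem.Dict.getD_modify, if_neg (Ne.symm hne)]

theorem nodup_keys_aStep (d : PySem.Dict Int Int) (p : Int × Int)
    (h : d.keys.Nodup) : (aStep d p).keys.Nodup := by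
  unfold aStep
  split_ifs
  · exact PySem.Dict.nodup_keys_insert d p.1 p.2 h
  all_goals
    simpa using PySem.Dict.nodup_keys_foldl_modify_key [p] (fun _ => _) 0
      (fun _ _ => (· + p.2)) d h

-- A-fold: contains
theorem A_contains : ∀ (L : List (Int × Int)) (d : PySem.Dict Int Int) (b : Int),
    (L.foldl aStep d).contains b = (d.contains b || L.any (fun p => b == pvBucket p.1)) := by
  intro L
  induction L with
  | nil => intro d b; simp
  | cons p L ih =>
      intro d b
      simp only [List.foldl_cons, ih, contains_aStep, List.any_cons]
      cases hd : d.contains b <;> cases hb : (b == pvBucket p.1) <;> simp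

-- A-fold: keys stay nodup
theorem A_nodup : ∀ (L : List (Int × Int)) (d : PySem.Dict Int Int),
    d.keys.Nodup → (L.foldl aStep d).keys.Nodup := by
  intro L
  induction L with
  | nil => intro d h; simpa using h
  | cons p L ih => intro d h; exact ih _ (nodup_keys_aStep d p h)

-- A-fold: getD, under freshness of the ≤5 keys and distinct firsts
theorem A_getD : ∀ (L : List (Int × Int)) (d : PySem.Dict Int Int) (b : Int),
    (∀ p ∈ L, p.1 ≤ 5 → d.contains p.1 = false) →
    L.Pairwise (fun p q => p.1 ≠ q.1) →
    (L.foldl aStep d).getD b 0 =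
      d.getD b 0 + ((L.filter (fun p => pvBucket p.1 == b)).map (·.2)).sum := by
  intro L
  induction L with
  | nil => intro d b _ _; simp
  | cons p L ih =>
      intro d b hfresh hpw
      have hpwt := (List.pairwise_cons.mp hpw).2
      have hhd := (List.pairwise_cons.mp hpw).1
      have hfresh' : ∀ q ∈ L, q.1 ≤ 5 → (aStep d p).contains q.1 = false := by
        intro q hq hq5
        rw [contains_aStep]
        have h1 : d.contains q.1 = false := hfresh q (List.mem_cons_of_mem _ hq) hq5
        have h2 : pvBucket p.1 ≠ q.1 := aStep_keyfact p q.1 hq5 (hhd q hq)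
        simp [h1, h2.symm]
      rw [List.foldl_cons, ih _ b hfresh' hpwt,
          getD_aStep d p b (hfresh p (List.mem_cons_self)),
          List.filter_cons]
      by_cases hpb : (pvBucket p.1 == b) = true
      · simp only [hpb, if_pos, List.map_cons, List.sum_cons]
        ring
      · simp only [hpb, Bool.false_eq_true, if_false]
        ring

-- counting identity: summing vals.count over the distinct keys in a bucket = count of the bucket among the mapped values
theorem sum_counts_eq_countP (p : Int → Bool) (vals S : List Int)
    (hnd : S.Nodup) (hmem : ∀ k, k ∈ S ↔ k ∈ vals) :
    ((S.filter p).map (fun k => (vals.count k : Int))).sum = (vals.countP p : Int) := by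
  have h1 : (S.filter p).Nodup := hnd.filter _
  have hmap : (S.filter p).map (fun k => (vals.count k : Int))
      = ((S.filter p).map (fun k => vals.count k)).map (fun n : Nat => (n : Int)) := by
    rw [List.map_map]; rfl
  rw [hmap, ← Nat.cast_list_sum]
  norm_cast
  rw [← List.sum_toFinset _ h1]
  have hS : (S.filter p).toFinset = (vals.filter p).toFinset := by
    rw [List.toFinset_filter, List.toFinset_filter]
    ext a
    simp [List.mem_toFinset, hmem a]
  rw [hS]
  have hcongr : ∑ a ∈ (vals.filter p).toFinset, vals.count a
      = ∑ a ∈ (vals.filter p).toFinset, (vals.filter p).count a := by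
    apply Finset.sum_congr rfl
    intro a ha
    have hpa : p a = true := (List.mem_filter.mp (List.mem_toFinset.mp ha)).2
    rw [List.count_filter hpa]
  rw [hcongr, List.sum_toFinset_count_eq_length, List.countP_eq_length_filter]

theorem count_bucket (vals : List Int) (b : Int) :
    (vals.map pvBucket).count b = vals.countP (fun v => pvBucket v == b) := by
  induction vals with
  | nil => simp
  | cons v t ih => simp [List.map_cons, List.count_cons, List.countP_cons, ih]

theorem degreestatistic_spec' : ∀ (l : List (Int × Int)),
    degreestatistic l = degreestatistic_alt l := by
  intro l
  have hcnt : (l.foldl (fun d p => d.modify p.2 0 (· + 1)) PySem.Dict.empty)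
      = PySem.Dict.counter (l.map (fun p => p.2)) := by
    rw [PySem.Dict.counter_eq_foldl, List.foldl_map]
  have hBd : (l.foldl (fun d p => d.modify (pvBucket p.2) 0 (· + 1)) PySem.Dict.empty)
      = PySem.Dict.counter ((l.map (fun p => p.2)).map pvBucket) := by
    rw [PySem.Dict.counter_eq_foldl, List.map_map, List.foldl_map]
    rfl
  -- abbreviations
  set vals : List Int := l.map (fun p => p.2) with hv
  set mvals : List Int := vals.map pvBucket with hmv
  set S : List Int := PySem.Set.ofList vals with hS
  set LA : List (Int × Int) := (PySem.Dict.counter vals).items with hLA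
  set dA : PySem.Dict Int Int := LA.foldl aStep PySem.Dict.empty with hdA
  set dB : PySem.Dict Int Int := PySem.Dict.counter mvals with hdB
  -- facts
  have hnodA : dA.keys.Nodup := A_nodup LA PySem.Dict.empty PySem.Dict.nodup_keys_empty
  have hnodB : dB.keys.Nodup := PySem.Dict.nodup_keys_counter mvals
  have hpw : LA.Pairwise (fun p q => p.1 ≠ q.1) := by
    rw [hLA, PySem.Dict.items_counter, List.pairwise_map]
    exact PySem.Set.nodup_ofList vals
  have hfresh0 : ∀ p ∈ LA, p.1 ≤ 5 → (PySem.Dict.empty : PySem.Dict Int Int).contains p.1 = false :=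
    fun p _ _ => PySem.Dict.contains_empty p.1
  have hgetA : ∀ b, dA.getD b 0 = (mvals.count b : Int) := by
    intro b
    rw [hdA, A_getD LA PySem.Dict.empty b hfresh0 hpw, PySem.Dict.getD_empty, zero_add,
        hLA, PySem.Dict.items_counter, List.filter_map, List.map_map]
    rw [hmv, count_bucket vals b]
    exact sum_counts_eq_countP (fun k => pvBucket k == b) vals (PySem.Set.ofList vals)
      (PySem.Set.nodup_ofList vals) (fun k => PySem.Set.mem_ofList vals k)
  have hgetB : ∀ b, dB.getD b 0 = (mvals.count b : Int) := by
    intro b; rw [hdB]; exact PySem.Dict.getD_counter mvals b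
  have hkeysA : ∀ b, b ∈ dA.keys ↔ b ∈ mvals := by
    intro b
    rw [← PySem.Dict.contains_iff_mem_keys, hdA, A_contains LA PySem.Dict.empty b,
        PySem.Dict.contains_empty, Bool.false_or, List.any_eq_true]
    constructor
    · rintro ⟨p, hp, hbp⟩
      rw [hLA, PySem.Dict.items_counter] at hp
      obtain ⟨k, hk, rfl⟩ := List.mem_map.mp hp
      exact List.mem_map.mpr ⟨k, (PySem.Set.mem_ofList vals k).mp hk, (beq_iff_eq.mp hbp).symm⟩
    · intro hb
      obtain ⟨k, hk, rfl⟩ := List.mem_map.mp hb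
      refine ⟨(k, (vals.count k : Int)), ?_, by simp⟩
      rw [hLA, PySem.Dict.items_counter]
      exact List.mem_map.mpr ⟨k, (PySem.Set.mem_ofList vals k).mpr hk, rfl⟩
  have hkeysB : ∀ b, b ∈ dB.keys ↔ b ∈ mvals := by
    intro b
    rw [hdB, PySem.Dict.keys_counter]
    exact PySem.Set.mem_ofList mvals b
  have hitemsA : dA.items = dA.keys.map (fun k => (k, dA.getD k 0)) :=
    PySem.Dict.items_eq_map_keys dA hnodA 0
  have hitemsB : dB.items = dB.keys.map (fun k => (k, dB.getD k 0)) :=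
    PySem.Dict.items_eq_map_keys dB hnodB 0
  have hinj : ∀ (d : PySem.Dict Int Int), Function.Injective (fun k => (k, d.getD k 0)) :=
    fun d a b h => congrArg Prod.fst h
  have hnditemsA : dA.items.Nodup := by rw [hitemsA]; exact hnodA.map (hinj dA)
  have hnditemsB : dB.items.Nodup := by rw [hitemsB]; exact hnodB.map (hinj dB)
  have hmemitems : ∀ x, x ∈ dB.items ↔ x ∈ dA.items := by
    intro x
    rw [hitemsA, hitemsB]
    constructor
    · intro hx
      obtain ⟨k, hk, rfl⟩ := List.mem_map.mp hx
      refine List.mem_map.mpr ⟨k, (hkeysA k).mpr ((hkeysB k).mp hk), ?_⟩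
      rw [hgetA k, ← hgetB k]
    · intro hx
      obtain ⟨k, hk, rfl⟩ := List.mem_map.mp hx
      refine List.mem_map.mpr ⟨k, (hkeysB k).mpr ((hkeysA k).mp hk), ?_⟩
      rw [hgetB k, ← hgetA k]
  have hperm : dB.items.Perm dA.items :=
    (List.perm_ext_iff_of_nodup hnditemsB hnditemsA).mpr hmemitems
  -- the sorted output of B is the sorted output of A
  have hyperm : (PySem.List.sorted dB.items (fun it => it.1) false).Perm dA.items :=
    (PySem.List.sorted_perm dB.items (fun it => it.1) false).trans hperm
  have hle : (PySem.List.sorted dB.items (fun it => it.1) false).Pairwise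
      (fun a b => a.1 ≤ b.1) := PySem.List.sorted_pairwise dB.items (fun it => it.1)
  have hkeysdef : dB.items.map (fun p => p.1) = dB.keys := rfl
  have hysnod : ((PySem.List.sorted dB.items (fun it => it.1) false).map (fun p => p.1)).Nodup := by
    refine (List.Perm.nodup_iff ?_).mpr (hkeysdef ▸ hnodB)
    exact (PySem.List.sorted_perm dB.items (fun it => it.1) false).map (fun p => p.1)
  have hne : (PySem.List.sorted dB.items (fun it => it.1) false).Pairwise
      (fun a b => a.1 ≠ b.1) := List.pairwise_map.mp hysnod
  have hlt : (PySem.List.sorted dB.items (fun it => it.1) false).Pairwise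
      (fun a b => a.1 < b.1) :=
    (hle.and hne).imp (fun h => lt_of_le_of_ne h.1 h.2)
  have key : PySem.List.sorted dA.items (fun it => it.1) false
      = PySem.List.sorted dB.items (fun it => it.1) false :=
    PySem.List.sorted_eq_of_perm_of_pairwise_lt dA.items _ (fun it => it.1) hyperm hlt
  -- unfold the two ports and conclude
  show PySem.List.sorted
      ((((l.foldl (fun d p => d.modify p.2 0 (· + 1)) PySem.Dict.empty).items).foldl
        aStep PySem.Dict.empty).items) (fun item => item.1) false
    = PySem.List.sorted
        ((l.foldl (fun d p => d.modify (pvBucket p.2) 0 (· + 1)) PySem.Dict.empty).items)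
        (fun item => item.1) false
  rw [hcnt, hBd]
  exact key

-- ===== VERDICT (by name: the statement is the Claim_ definition above) =====
theorem degreestatistic_spec : Claim_equal_degreestatistic := by
  intro l _
  unfold Spec_degreestatistic
  exact degreestatistic_spec' l
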